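-- pv_equiv track=rewrite | github.com/ankitshah009/leetcode_python | graphs/1063-number_of_valid_subarrays.py | validSubarrays
-- ===== SOURCE A (Python) =====
-- from typing import List
--
-- def validSubarrays(nums: List[int]) -> int:
--     """O(n^2) brute force for verification"""
--     n = len(nums)
--     count = 0
--
--     for i in range(n):
--         for j in range(i, n):
--             if all(nums[k] >= nums[i] for k in range(i, j + 1)):
--                 count += 1
--             else:
--                 break
--
--     return count
-- ===== SOURCE B (Python) =====
-- from typing import List
--
-- def validSubarrays(nums: List[int]) -> int:
--     """O(n) monotonic stack: for each right end j, the stack holds exactly the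
--     left ends i <= j whose element is <= every element of nums[i..j]."""
--     stack = []
--     count = 0
--     for x in nums:
--         while stack and stack[-1] > x:
--             stack.pop()
--         stack.append(x)
--         count += len(stack)
--     return count
-- ===== Notes on version B (the rewrite author's own statement) =====
-- stated objective: faster
-- what changed: Replaces A's per-left-end nested scans (an O(n)-check inner loop inside an O(n^2) double loop) with a single left-to-right pass over a monotonic non-decreasing stack, counting for each right end the stack size.
import Mathlib
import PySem

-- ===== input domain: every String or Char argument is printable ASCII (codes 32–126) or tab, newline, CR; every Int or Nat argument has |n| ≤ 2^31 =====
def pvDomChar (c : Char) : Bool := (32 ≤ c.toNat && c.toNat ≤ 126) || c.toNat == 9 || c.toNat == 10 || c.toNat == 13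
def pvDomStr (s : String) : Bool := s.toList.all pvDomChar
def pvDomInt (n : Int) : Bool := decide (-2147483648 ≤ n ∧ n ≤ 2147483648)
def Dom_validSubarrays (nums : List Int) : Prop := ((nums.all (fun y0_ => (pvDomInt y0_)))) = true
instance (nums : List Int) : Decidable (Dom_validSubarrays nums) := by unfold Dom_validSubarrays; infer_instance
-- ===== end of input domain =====

-- B replaces A's O(n^2) per-left-end scans by a single monotonic-stack pass (objective: faster, asymptotic).

-- ===== PORT A =====
-- all(nums[k] >= nums[i] for k in range(i, j + 1)); every k produced by range lies in [0, n), so getD is exact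
def pvCheck (l : List Int) (i j : Nat) : Bool :=
  (List.range' i (j + 1 - i)).all (fun k => decide (l.getD i 0 ≤ l.getD k 0))

-- the inner 'for j in range(i, n): if … count += 1 else break'
def pvInnerA (l : List Int) (i : Nat) : List Nat → Int → Int
  | [], c => c
  | j :: js, c => if pvCheck l i j then pvInnerA l i js (c + 1) else c

def validSubarrays (nums : List Int) : Int :=
  let n := nums.length
  (List.range n).foldl (fun count i => pvInnerA nums i (List.range' i (n - i)) count) 0

-- ===== PORT B =====
-- 'while stack and stack[-1] > x: stack.pop()'  (stack top is the last list element)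
def pvPopGt (x : Int) : List Int → List Int
  | [] => []
  | a :: rest =>
    match pvPopGt x rest with
    | [] => if x < a then [] else [a]
    | b :: r => a :: b :: r

def validSubarrays_alt (nums : List Int) : Int :=
  (nums.foldl (fun (p : List Int × Int) x =>
      let st := pvPopGt x p.1 ++ [x]
      (st, p.2 + (st.length : Int))) ([], 0)).2

-- ===== PRECONDITION & SPEC =====
def Spec_validSubarrays (nums : List Int) (out : Int) : Prop := out = validSubarrays_alt nums
instance (nums : List Int) (out : Int) : Decidable (Spec_validSubarrays nums out) := by unfold Spec_validSubarrays; infer_instance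

-- ===== CLAIM (what is proved, stated in full; the proofs are below) =====
def Claim_equal_validSubarrays : Prop := ∀ (nums : List Int), Dom_validSubarrays nums → Spec_validSubarrays nums (validSubarrays nums)

-- ===== LEMMAS AND PROOFS =====

-- value at index i (indices we use are always < length)
def pvG (l : List Int) (i : Nat) : Int := l.getD i 0

-- length of the maximal run nums[i..] all ≥ nums[i]
def pvSpan (l : List Int) (i : Nat) : Nat :=
  ((l.drop i).takeWhile (fun y => decide (pvG l i ≤ y))).length

-- 'valid to the end': every element from i on is ≥ nums[i]
def pvVE (l : List Int) (i : Nat) : Bool :=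
  (l.drop i).all (fun y => decide (pvG l i ≤ y))

-- the values at valid-to-the-end indices, in index order (= B's stack)
def pvStack (l : List Int) : List Int :=
  (((List.range l.length).filter (fun i => pvVE l i)).map (fun i => pvG l i))

def pvSpec (l : List Int) : Int :=
  ((List.range l.length).map (fun i => (pvSpan l i : Int))).sum

theorem pvInnerA_eq (l : List Int) (i : Nat) :
    ∀ (js : List Nat) (c : Int),
      pvInnerA l i js c = c + ((js.takeWhile (fun j => pvCheck l i j)).length : Int) := by
  intro js
  induction js with
  | nil => intro c; simp [pvInnerA, List.takeWhile]
  | cons j js ih =>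
    intro c
    by_cases h : pvCheck l i j
    · simp only [pvInnerA, h, if_pos, List.takeWhile_cons, ih, List.length_cons]
      push_cast; ring
    · simp [pvInnerA, h]


theorem pvVE_le (p : List Int) (i j : Nat) (h : pvVE p i = true)
    (hij : i < j) (hj : j < p.length) : pvG p i ≤ pvG p j := by
  have hj' : j - i < (p.drop i).length := by simp [List.length_drop]; omega
  have hmem : (p.drop i)[j - i] ∈ p.drop i := List.getElem_mem _
  rw [pvVE, List.all_eq_true] at h
  have := h _ hmem
  simp only [decide_eq_true_eq] at this
  have he : (p.drop i)[j - i] = p[j] := by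
    rw [List.getElem_drop]
    congr 1; omega
  rw [he] at this
  show pvG p i ≤ pvG p j
  rw [show pvG p j = p[j] from List.getD_eq_getElem p 0 hj]
  exact this


theorem pvTakeWhile_check (l : List Int) (i : Nat) :
    ∀ (m a : Nat), i ≤ a → a + m = l.length →
      (∀ k, i ≤ k → k < a → pvG l i ≤ pvG l k) →
      (((List.range' a m).takeWhile (fun j => pvCheck l i j)).length)
        = ((l.drop a).takeWhile (fun y => decide (pvG l i ≤ y))).length := by
  intro m
  induction m with
  | zero =>
    intro a hia hlen _
    have : a = l.length := by omega
    subst this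
    rw [List.range'_zero, List.drop_length]
    rfl
  | succ m ih =>
    intro a hia hlen hyp
    have ha : a < l.length := by omega
    have hkey : pvCheck l i a = decide (pvG l i ≤ pvG l a) := by
      by_cases hx : pvG l i ≤ pvG l a
      · simp only [hx, decide_true, pvCheck, List.all_eq_true]
        intro k hk
        have hk' := List.mem_range'_1.mp hk
        rcases Nat.lt_or_ge k a with hka | hka
        · exact decide_eq_true (hyp k hk'.1 hka)
        · have : k = a := by omega
          subst this; exact decide_eq_true hx
      · simp only [hx, decide_false, pvCheck, List.all_eq_false]
        refine ⟨a, ?_, by simpa using hx⟩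
        rw [List.mem_range'_1]
        omega
    rw [List.range'_succ, List.drop_eq_getElem_cons ha]
    have hga : l[a] = pvG l a := (List.getD_eq_getElem l 0 ha).symm
    by_cases hx : pvG l i ≤ pvG l a
    · rw [List.takeWhile_cons, List.takeWhile_cons, hkey, hga]
      simp only [hx, decide_true, if_pos, List.length_cons]
      have := ih (a + 1) (by omega) (by omega) (by
        intro k hk1 hk2
        rcases Nat.lt_or_ge k a with hka | hka
        · exact hyp k hk1 hka
        · have : k = a := by omega
          subst this; exact hx)
      omega
    · rw [List.takeWhile_cons, List.takeWhile_cons, hkey, hga]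
      simp [hx]


theorem pvA_eq_spec (l : List Int) : validSubarrays l = pvSpec l := by
  have main : ∀ (js : List Nat) (c : Int),
      js.foldl (fun count i => pvInnerA l i (List.range' i (l.length - i)) count) c
        = c + (js.map (fun i =>
            ((((List.range' i (l.length - i)).takeWhile (fun j => pvCheck l i j)).length : Int)))).sum := by
    intro js
    induction js with
    | nil => intro c; simp
    | cons j js ih =>
      intro c
      simp only [List.foldl_cons, List.map_cons, List.sum_cons]
      rw [pvInnerA_eq, ih]
      ring
  unfold validSubarrays pvSpec
  rw [main]
  simp only [zero_add]
  congr 1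
  apply List.map_congr_left
  intro i hi
  have hi' : i < l.length := List.mem_range.mp hi
  have := pvTakeWhile_check l i (l.length - i) i (le_refl i) (by omega)
    (by intro k h1 h2; omega)
  rw [this]
  rfl


theorem pvStack_sorted (p : List Int) : (pvStack p).Pairwise (· ≤ ·) := by
  unfold pvStack
  rw [List.pairwise_map]
  refine List.Pairwise.imp_of_mem ?_ ((List.pairwise_lt_range).filter _)
  intro a b ha hb hlt
  have hVEa : pvVE p a = true := by simpa using (List.mem_filter.mp ha).2
  have hb' : b < p.length := List.mem_range.mp (List.mem_filter.mp hb).1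
  exact pvVE_le p a b hVEa hlt hb'


theorem pvPopGt_filter (x : Int) :
    ∀ (s : List Int), s.Pairwise (· ≤ ·) →
      pvPopGt x s = s.filter (fun v => decide (v ≤ x)) := by
  intro s
  induction s with
  | nil => intro _; simp [pvPopGt]
  | cons a rest ih =>
    intro hp
    have hrest := ih (List.Pairwise.of_cons hp)
    have hall : ∀ b ∈ rest, a ≤ b := (List.pairwise_cons.mp hp).1
    simp only [pvPopGt]
    cases hcase : pvPopGt x rest with
    | nil =>
      have hf : rest.filter (fun v => decide (v ≤ x)) = [] := by rw [← hrest]; exact hcase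
      by_cases hax : x < a
      · simp [hf, show ¬ (a ≤ x) by omega, hax]
      · simp [hf, show a ≤ x by omega, hax]
    | cons b r =>
      have hf : rest.filter (fun v => decide (v ≤ x)) = b :: r := by rw [← hrest]; exact hcase
      have hbmem : b ∈ rest.filter (fun v => decide (v ≤ x)) := by rw [hf]; exact List.mem_cons_self
      have hb : b ≤ x := by
        have := (List.mem_filter.mp hbmem).2; simpa using this
      have hbr : b ∈ rest := (List.mem_filter.mp hbmem).1
      have hax : a ≤ x := le_trans (hall b hbr) hb
      simp [hax, hf]


theorem pvG_snoc_lt (p : List Int) (x : Int) (i : Nat) (h : i < p.length) :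
    pvG (p ++ [x]) i = pvG p i := List.getD_append p [x] 0 i h

theorem pvG_snoc_last (p : List Int) (x : Int) : pvG (p ++ [x]) p.length = x := by
  rw [pvG, List.getD_eq_getElem _ 0 (by simp)]
  simp

theorem pvVE_snoc_lt (p : List Int) (x : Int) (i : Nat) (h : i < p.length) :
    pvVE (p ++ [x]) i = (pvVE p i && decide (pvG p i ≤ x)) := by
  rw [pvVE, pvVE, List.drop_append_of_le_length (by omega), List.all_append,
    pvG_snoc_lt p x i h]
  simp

theorem pvVE_snoc_last (p : List Int) (x : Int) : pvVE (p ++ [x]) p.length = true := by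
  rw [pvVE, List.drop_append_of_le_length (le_refl _), List.drop_length, pvG_snoc_last]
  simp

theorem pvStack_snoc_filter (p : List Int) (x : Int) :
    pvStack (p ++ [x])
      = (((List.range p.length).filter (fun i => pvVE p i && decide (pvG p i ≤ x))).map
          (fun i => pvG p i)) ++ [x] := by
  unfold pvStack
  rw [List.length_append, List.length_singleton, List.range_succ, List.filter_append,
    List.map_append]
  congr 1
  · rw [List.filter_congr (fun i hi => by
      rw [pvVE_snoc_lt p x i (List.mem_range.mp hi)])]
    apply List.map_congr_left
    intro i hi
    have : i < p.length := List.mem_range.mp (List.mem_filter.mp hi).1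
    exact pvG_snoc_lt p x i this
  · simp [pvVE_snoc_last, pvG_snoc_last]

theorem pvStack_snoc (p : List Int) (x : Int) :
    pvStack (p ++ [x]) = pvPopGt x (pvStack p) ++ [x] := by
  rw [pvStack_snoc_filter, pvPopGt_filter x _ (pvStack_sorted p)]
  congr 1
  unfold pvStack
  rw [List.filter_map]
  conv_rhs => rw [List.filter_filter]
  congr 1
  apply List.filter_congr
  intro a _
  simp [Function.comp, Bool.and_comm]

-- helpers for sums
theorem pv_sum_map_add (f h : Nat → Int) :
    ∀ (js : List Nat), (js.map (fun i => f i + h i)).sum = (js.map f).sum + (js.map h).sum := by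
  intro js
  induction js with
  | nil => simp
  | cons j js ih => simp [ih]; ring

theorem pv_sum_ite_count (q : Nat → Bool) :
    ∀ (js : List Nat), (js.map (fun i => if q i then (1 : Int) else 0)).sum
      = ((js.filter q).length : Int) := by
  intro js
  induction js with
  | nil => simp
  | cons j js ih =>
    by_cases h : q j
    · simp [h, ih]; omega
    · simp [h, ih]

theorem pv_takeWhile_len_iff (q : Int → Bool) :
    ∀ (s : List Int), ((s.takeWhile q).length = s.length ↔ s.all q = true) := by
  intro s
  induction s with
  | nil => simp
  | cons a s ih =>
    by_cases h : q a
    · simp [h, ih]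
    · simp only [List.takeWhile_cons, h]
      simp only [List.length_cons, List.all_cons, h, Bool.false_and]
      constructor
      · intro hh; simp at hh
      · intro hh; cases hh

theorem pvSpan_snoc_lt (p : List Int) (x : Int) (i : Nat) (h : i < p.length) :
    (pvSpan (p ++ [x]) i : Int)
      = (pvSpan p i : Int) + (if pvVE p i && decide (pvG p i ≤ x) then (1 : Int) else 0) := by
  rw [pvSpan, List.drop_append_of_le_length (by omega)]
  rw [show (fun y => decide (pvG (p ++ [x]) i ≤ y)) = (fun y => decide (pvG p i ≤ y)) by
    rw [pvG_snoc_lt p x i h]]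
  rw [List.takeWhile_append]
  by_cases hVE : pvVE p i = true
  · have hlen : ((p.drop i).takeWhile (fun y => decide (pvG p i ≤ y))).length = (p.drop i).length :=
      (pv_takeWhile_len_iff _ _).mpr hVE
    rw [if_pos hlen]
    have hspan : pvSpan p i = (p.drop i).length := hlen
    by_cases hle : pvG p i ≤ x
    · rw [show (List.takeWhile (fun y => decide (pvG p i ≤ y)) [x]) = [x] from by simp [hle]]
      simp [pvSpan, hlen, hVE, hle]
    · rw [show (List.takeWhile (fun y => decide (pvG p i ≤ y)) [x]) = [] from by simp [hle]]
      simp [pvSpan, hlen, hVE, hle]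
  · have hlen : ¬ ((p.drop i).takeWhile (fun y => decide (pvG p i ≤ y))).length = (p.drop i).length := by
      intro hc; exact hVE ((pv_takeWhile_len_iff _ _).mp hc)
    rw [if_neg hlen]
    simp [pvSpan, hVE]

theorem pvSpan_snoc_last (p : List Int) (x : Int) : pvSpan (p ++ [x]) p.length = 1 := by
  rw [pvSpan, List.drop_append_of_le_length (le_refl _), List.drop_length, pvG_snoc_last]
  simp

theorem pvSpec_snoc (p : List Int) (x : Int) :
    pvSpec (p ++ [x]) = pvSpec p + ((pvStack (p ++ [x])).length : Int) := by
  unfold pvSpec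
  rw [List.length_append, List.length_singleton, List.range_succ, List.map_append,
    List.sum_append]
  rw [List.map_congr_left (fun i hi => pvSpan_snoc_lt p x i (List.mem_range.mp hi))]
  rw [pv_sum_map_add, pv_sum_ite_count]
  rw [pvStack_snoc_filter]
  simp [pvSpan_snoc_last]
  ring

theorem pvB_state (l : List Int) :
    l.foldl (fun (p : List Int × Int) x =>
      let st := pvPopGt x p.1 ++ [x]
      (st, p.2 + (st.length : Int))) ([], 0) = (pvStack l, pvSpec l) := by
  induction l using List.reverseRecOn with
  | nil => simp [pvStack, pvSpec]
  | append_singleton p x ih =>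
    rw [List.foldl_append, ih]
    simp only [List.foldl_cons, List.foldl_nil]
    rw [pvSpec_snoc, pvStack_snoc]

theorem pvB_eq_spec (l : List Int) : validSubarrays_alt l = pvSpec l := by
  unfold validSubarrays_alt
  rw [pvB_state]


-- ===== VERDICT (by name: the statement is the Claim_ definition above) =====
theorem validSubarrays_spec : Claim_equal_validSubarrays := by
  intro nums _
  unfold Spec_validSubarrays
  rw [pvA_eq_spec, pvB_eq_spec]
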